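-- pv_equiv track=rewrite | github.com/StarLight1212/gobang_minimax | gomoku_ai_gui.py | count_shape
-- ===== SOURCE A (Python) =====
-- def count_shape(board, x, y, dx, dy, role, size):
--     opponent = -role
--     inner_empty_count = 0
--     temp_empty_count = 0
--     self_count = 0
--     total_length = 0
--     side_empty_count = 0
--     no_empty_self_count = 0
--     one_empty_self_count = 0
--
--     # Search in the given direction (dx, dy)
--     for i in range(1, 6):  # Check up to 5 steps away
--         nx, ny = x + i * dx, y + i * dy
--
--         # Check bounds (adjusting for the border)
--         if not (0 <= nx < size and 0 <= ny < size):
--             break  # Wall hit equivalent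
--
--         current_role = board[nx + 1][ny + 1]
--
--         if current_role == 2 or current_role == opponent:  # Boundary or opponent
--             break
--
--         total_length += 1
--         if current_role == role:
--             self_count += 1
--             side_empty_count = 0  # Reset side empty count on finding own piece
--             if temp_empty_count > 0:
--                 inner_empty_count += temp_empty_count
--                 temp_empty_count = 0
--
--             if inner_empty_count == 0:
--                 no_empty_self_count += 1
--                 one_empty_self_count += 1
--             elif inner_empty_count == 1:
--                 one_empty_self_count += 1
--
--         elif current_role == 0:  # Empty spot
--             temp_empty_count += 1
--             side_empty_count += 1
--
--         # If we have two consecutive empty spots at the edge, stop extending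
--         if side_empty_count >= 2:
--             break
--
--     # If no inner empty spaces were found, one_empty_self_count should reflect only contiguous pieces
--     if inner_empty_count == 0:
--         one_empty_self_count = 0  # Reset if only contiguous pieces found
--
--     return {
--         "self_count": self_count,
--         "total_length": total_length,
--         "no_empty_self_count": no_empty_self_count,
--         "one_empty_self_count": one_empty_self_count,
--         "inner_empty_count": inner_empty_count,
--         "side_empty_count": side_empty_count
--     }
-- ===== SOURCE B (Python) =====
-- def count_shape(board, x, y, dx, dy, role, size):
--     # Pass 1: extract the analysed ray, stopping exactly where the scan ends.
--     cells = []
--     run = 0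
--     for i in range(1, 6):
--         nx, ny = x + i * dx, y + i * dy
--         if not (0 <= nx < size and 0 <= ny < size):
--             break
--         c = board[nx + 1][ny + 1]
--         if c == 2 or c == -role:
--             break
--         run = 0 if c == role else run + 1 if c == 0 else run
--         cells.append(c)
--         if run >= 2:
--             break
--     # Pass 2: record the prefix-empty count at each own piece; all six statistics
--     # are derived from that list instead of a seven-counter state machine.
--     zeros = 0
--     pre = []
--     for c in cells:
--         if c == role:
--             pre.append(zeros)
--         elif c == 0:
--             zeros += 1
--     inner = pre[-1] if pre else 0
--     one_empty = sum(1 for p in pre if p <= 1) if inner > 0 else 0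
--     return {
--         "self_count": len(pre),
--         "total_length": len(cells),
--         "no_empty_self_count": pre.count(0),
--         "one_empty_self_count": one_empty,
--         "inner_empty_count": inner,
--         "side_empty_count": zeros - inner,
--     }
-- ===== Notes on version B (the rewrite author's own statement) =====
-- stated objective: alternative
-- what changed: B splits A's fused seven-counter loop into (1) extraction of the scanned ray as a list and (2) a derivation of all six statistics from the list of prefix-empty counts recorded at each own piece (inner = last prefix count, side = total zeros minus inner, counts via pre.count), replacing the temp/side/no_empty/one_empty state machine.
import Mathlib
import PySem

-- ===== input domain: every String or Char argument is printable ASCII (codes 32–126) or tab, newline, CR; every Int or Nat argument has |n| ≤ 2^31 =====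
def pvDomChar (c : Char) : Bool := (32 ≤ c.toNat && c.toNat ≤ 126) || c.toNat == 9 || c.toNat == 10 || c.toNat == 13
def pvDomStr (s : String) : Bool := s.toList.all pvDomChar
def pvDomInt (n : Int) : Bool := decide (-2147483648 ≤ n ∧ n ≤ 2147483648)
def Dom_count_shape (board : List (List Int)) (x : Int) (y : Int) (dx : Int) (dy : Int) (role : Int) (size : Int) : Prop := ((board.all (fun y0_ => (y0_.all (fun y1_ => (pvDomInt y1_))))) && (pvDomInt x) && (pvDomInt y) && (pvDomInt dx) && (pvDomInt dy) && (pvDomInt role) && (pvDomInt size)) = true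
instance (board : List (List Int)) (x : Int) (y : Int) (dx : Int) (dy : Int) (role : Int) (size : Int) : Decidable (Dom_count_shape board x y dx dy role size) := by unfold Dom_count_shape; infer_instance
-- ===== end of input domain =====

-- B replaces A's fused seven-counter scan by: extract the scanned ray as a list, then derive
-- all six statistics from the prefix-empty counts recorded at each own piece (alternative decomposition).


-- ===== PORT A =====
-- state = (inner_empty_count, temp_empty_count, self_count, total_length, side_empty_count,
--          no_empty_self_count, one_empty_self_count)
-- stepA is A's loop-body update, in A's order (if current==role / elif ==0 / else pass, total += 1)
def stepA (role : Int) (s : Int × Int × Int × Int × Int × Int × Int) (c : Int) :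
    Int × Int × Int × Int × Int × Int × Int :=
  if c = role then
    let inner' := if s.2.1 > 0 then s.1 + s.2.1 else s.1
    let temp' := if s.2.1 > 0 then 0 else s.2.1
    let noe' := if inner' = 0 then s.2.2.2.2.2.1 + 1 else s.2.2.2.2.2.1
    let onee' := if inner' = 0 then s.2.2.2.2.2.2 + 1
      else if inner' = 1 then s.2.2.2.2.2.2 + 1 else s.2.2.2.2.2.2
    (inner', temp', s.2.2.1 + 1, s.2.2.2.1 + 1, (0 : Int), noe', onee')
  else if c = 0 then
    (s.1, s.2.1 + 1, s.2.2.1, s.2.2.2.1 + 1, s.2.2.2.2.1 + 1, s.2.2.2.2.2.1, s.2.2.2.2.2.2)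
  else
    (s.1, s.2.1, s.2.2.1, s.2.2.2.1 + 1, s.2.2.2.2.1, s.2.2.2.2.2.1, s.2.2.2.2.2.2)

-- A's for-loop over i = 1..5 with its breaks; board[nx+1][ny+1] via pyGet? (none = Python's
-- IndexError, excluded by Pre_count_shape; the port stops there, never reached inside Pre_).
def count_shape_loop (board : List (List Int)) (x : Int) (y : Int) (dx : Int) (dy : Int)
    (role : Int) (size : Int) :
    Nat → Int → (Int × Int × Int × Int × Int × Int × Int) → (Int × Int × Int × Int × Int × Int × Int)
  | 0, _, s => s
  | Nat.succ fuel, i, s =>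
    let nx := x + i * dx
    let ny := y + i * dy
    if 0 ≤ nx ∧ nx < size ∧ 0 ≤ ny ∧ ny < size then
      match PySem.List.pyGet? board (nx + 1) with
      | none => s
      | some row =>
        match PySem.List.pyGet? row (ny + 1) with
        | none => s
        | some c =>
          if c = 2 ∨ c = -role then s
          else
            let s' := stepA role s c
            if s'.2.2.2.2.1 ≥ 2 then s'
            else count_shape_loop board x y dx dy role size fuel (i + 1) s'
    else s

def count_shape (board : List (List Int)) (x : Int) (y : Int) (dx : Int) (dy : Int) (role : Int) (size : Int) : List (String × Int) :=
  let s := count_shape_loop board x y dx dy role size 5 1 (0, 0, 0, 0, 0, 0, 0)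
  let onee' := if s.1 = 0 then 0 else s.2.2.2.2.2.2
  [("self_count", s.2.2.1), ("total_length", s.2.2.2.1), ("no_empty_self_count", s.2.2.2.2.2.1),
   ("one_empty_self_count", onee'), ("inner_empty_count", s.1), ("side_empty_count", s.2.2.2.2.1)]

-- ===== PORT B =====
-- pass 1 of Source B: the scanned ray as a list (run = current trailing-empty run, breaks as in the scan)
def cells_loop (board : List (List Int)) (x : Int) (y : Int) (dx : Int) (dy : Int)
    (role : Int) (size : Int) : Nat → Int → Int → List Int
  | 0, _, _ => []
  | Nat.succ fuel, i, run =>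
    let nx := x + i * dx
    let ny := y + i * dy
    if 0 ≤ nx ∧ nx < size ∧ 0 ≤ ny ∧ ny < size then
      match PySem.List.pyGet? board (nx + 1) with
      | none => []
      | some row =>
        match PySem.List.pyGet? row (ny + 1) with
        | none => []
        | some c =>
          if c = 2 ∨ c = -role then []
          else
            let run' := if c = role then 0 else if c = 0 then run + 1 else run
            if run' ≥ 2 then [c]
            else c :: cells_loop board x y dx dy role size fuel (i + 1) run'
    else []

-- pass 2 of Source B: (zeros, pre) where pre lists the prefix-empty count at each own piece
def preZeros (role : Int) : List Int → Int → Int × List Int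
  | [], z => (z, [])
  | c :: t, z =>
    if c = role then
      let zp := preZeros role t z
      (zp.1, z :: zp.2)
    else if c = 0 then preZeros role t (z + 1)
    else preZeros role t z

def count_shape_alt (board : List (List Int)) (x : Int) (y : Int) (dx : Int) (dy : Int) (role : Int) (size : Int) : List (String × Int) :=
  let cells := cells_loop board x y dx dy role size 5 1 0
  let zp := preZeros role cells 0
  let inner := zp.2.getLast?.getD 0
  let onee := if inner > 0 then ((zp.2.filter (fun p => p ≤ 1)).length : Int) else 0
  [("self_count", (zp.2.length : Int)), ("total_length", (cells.length : Int)),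
   ("no_empty_self_count", (zp.2.count 0 : Int)), ("one_empty_self_count", onee),
   ("inner_empty_count", inner), ("side_empty_count", zp.1 - inner)]

-- ===== PRECONDITION & SPEC =====
-- the cell A reads at step i: board[x+i*dx+1][y+i*dy+1] (none = Python IndexError)
def pvCell (board : List (List Int)) (x y dx dy i : Int) : Option Int :=
  (PySem.List.pyGet? board (x + i * dx + 1)).bind
    (fun row => PySem.List.pyGet? row (y + i * dy + 1))

-- Pre_ excludes EXACTLY the inputs on which A raises IndexError: a step i that the scan actually
-- reaches (steps 1..i all in bounds, every earlier cell readable and neither 2 nor the opponent,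
-- and no earlier stop at a second empty unseparated by an own piece) must have a readable cell.
def Pre_count_shape (board : List (List Int)) (x : Int) (y : Int) (dx : Int) (dy : Int) (role : Int) (size : Int) : Prop :=
  ∀ i ∈ ([1, 2, 3, 4, 5] : List Int),
    ((∀ j ∈ ([1, 2, 3, 4, 5] : List Int), j ≤ i →
        0 ≤ x + j * dx ∧ x + j * dx < size ∧ 0 ≤ y + j * dy ∧ y + j * dy < size) ∧
     (∀ j ∈ ([1, 2, 3, 4, 5] : List Int), j < i →
        pvCell board x y dx dy j ≠ none ∧ (pvCell board x y dx dy j).getD 0 ≠ 2 ∧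
          (pvCell board x y dx dy j).getD 0 ≠ -role) ∧
     ¬ (∃ k ∈ ([1, 2, 3, 4, 5] : List Int), k < i ∧ pvCell board x y dx dy k = some 0 ∧
          ∃ m ∈ ([1, 2, 3, 4, 5] : List Int), m < k ∧ pvCell board x y dx dy m = some 0 ∧
            ∀ t ∈ ([1, 2, 3, 4, 5] : List Int), m < t → t < k →
              pvCell board x y dx dy t ≠ some role)) →
    pvCell board x y dx dy i ≠ none
instance (board : List (List Int)) (x : Int) (y : Int) (dx : Int) (dy : Int) (role : Int) (size : Int) : Decidable (Pre_count_shape board x y dx dy role size) := by unfold Pre_count_shape; infer_instance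

def pvWitness_count_shape : List (List Int) × Int × Int × Int × Int × Int × Int :=
  ([[2, 2, 2, 2], [2, 0, 1, 2], [2, 1, 0, 2], [2, 2, 2, 2]], 0, 0, 1, 1, 1, 2)

def Spec_count_shape (board : List (List Int)) (x : Int) (y : Int) (dx : Int) (dy : Int) (role : Int) (size : Int) (out : List (String × Int)) : Prop := out = count_shape_alt board x y dx dy role size
instance (board : List (List Int)) (x : Int) (y : Int) (dx : Int) (dy : Int) (role : Int) (size : Int) (out : List (String × Int)) : Decidable (Spec_count_shape board x y dx dy role size out) := by unfold Spec_count_shape; infer_instance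

-- ===== CLAIM (what is proved, stated in full; the proofs are below) =====
def Claim_equal_count_shape : Prop := ∀ (board : List (List Int)) (x : Int) (y : Int) (dx : Int) (dy : Int) (role : Int) (size : Int), Dom_count_shape board x y dx dy role size → Pre_count_shape board x y dx dy role size → Spec_count_shape board x y dx dy role size (count_shape board x y dx dy role size)

-- ===== LEMMAS AND PROOFS =====

theorem stepA_side (role : Int) (s : Int × Int × Int × Int × Int × Int × Int) (c : Int) :
    (stepA role s c).2.2.2.2.1 =
      (if c = role then (0 : Int) else if c = 0 then s.2.2.2.2.1 + 1 else s.2.2.2.2.1) := by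
  simp only [stepA]
  split_ifs <;> rfl

-- fusion: A's loop is the fold of stepA over B's extracted ray, provided the run argument
-- equals the state's side_empty_count component
theorem loop_eq_foldl_cells (board : List (List Int)) (x y dx dy role size : Int) :
    ∀ (fuel : Nat) (i : Int) (s : Int × Int × Int × Int × Int × Int × Int),
      count_shape_loop board x y dx dy role size fuel i s =
        List.foldl (stepA role) s (cells_loop board x y dx dy role size fuel i s.2.2.2.2.1) := by
  intro fuel
  induction fuel with
  | zero => intro i s; simp [count_shape_loop, cells_loop]
  | succ n ih =>
    intro i s
    simp only [count_shape_loop, cells_loop]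
    by_cases hb : 0 ≤ x + i * dx ∧ x + i * dx < size ∧ 0 ≤ y + i * dy ∧ y + i * dy < size
    · simp only [if_pos hb]
      cases hrow : PySem.List.pyGet? board (x + i * dx + 1) with
      | none => simp
      | some row =>
        simp only []
        cases hc : PySem.List.pyGet? row (y + i * dy + 1) with
        | none => simp
        | some c =>
          simp only []
          by_cases hbr : c = 2 ∨ c = -role
          · simp [hbr]
          · simp only [if_neg hbr]
            by_cases hge :
                (if c = role then (0 : Int) else if c = 0 then s.2.2.2.2.1 + 1 else s.2.2.2.2.1) ≥ 2
            · rw [if_pos (by rw [stepA_side]; exact hge), if_pos hge]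
              simp [List.foldl]
            · rw [if_neg (by rw [stepA_side]; exact hge), if_neg hge,
                 ih (i + 1) (stepA role s c), stepA_side, List.foldl_cons]
    · simp [hb]

-- the invariant connecting the fold state to Source B's (zeros, pre)
def StatsInv (z : Int) (p : List Int) (n : Int) (s : Int × Int × Int × Int × Int × Int × Int) : Prop :=
  s.1 = p.getLast?.getD 0 ∧ s.2.1 = z - p.getLast?.getD 0 ∧ s.2.2.1 = (p.length : Int) ∧
    s.2.2.2.1 = n ∧ s.2.2.2.2.1 = z - p.getLast?.getD 0 ∧ s.2.2.2.2.2.1 = (p.count 0 : Int) ∧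
    s.2.2.2.2.2.2 = ((p.filter (fun a => a ≤ 1)).length : Int) ∧ 0 ≤ z ∧
    ∀ a ∈ p, 0 ≤ a ∧ a ≤ z

theorem lastD_nonneg_le (z : Int) (p : List Int) (hz : 0 ≤ z) (h : ∀ a ∈ p, 0 ≤ a ∧ a ≤ z) :
    0 ≤ p.getLast?.getD 0 ∧ p.getLast?.getD 0 ≤ z := by
  cases hgl : p.getLast? with
  | none => simpa using hz
  | some a =>
    have := h a (List.mem_of_getLast? hgl)
    simpa using this

theorem foldl_stepA_inv (role : Int) :
    ∀ (t : List Int) (z : Int) (p : List Int) (n : Int)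
      (s : Int × Int × Int × Int × Int × Int × Int),
      StatsInv z p n s →
      StatsInv (preZeros role t z).1 (p ++ (preZeros role t z).2) (n + (t.length : Int))
        (List.foldl (stepA role) s t) := by
  intro t
  induction t with
  | nil => intro z p n s h; simpa [preZeros] using h
  | cons c t ih =>
    intro z p n s h
    obtain ⟨h1, h2, h3, h4, h5, h6, h7, hz, hbnd⟩ := h
    obtain ⟨hL0, hLz⟩ := lastD_nonneg_le z p hz hbnd
    have hlen : n + (((c :: t).length : Nat) : Int) = (n + 1) + (t.length : Int) := by
      push_cast [List.length_cons]; ring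
    by_cases hcr : c = role
    · have e1a : (preZeros role (c :: t) z).1 = (preZeros role t z).1 := by
        simp only [preZeros, if_pos hcr]
      have e1b : (preZeros role (c :: t) z).2 = z :: (preZeros role t z).2 := by
        simp only [preZeros, if_pos hcr]
      have hstep : StatsInv z (p ++ [z]) (n + 1) (stepA role s c) := by
        have hlast : (p ++ [z]).getLast?.getD 0 = z := by simp
        have hinner : (if s.2.1 > 0 then s.1 + s.2.1 else s.1) = z := by split_ifs <;> omega
        refine ⟨?_, ?_, ?_, ?_, ?_, ?_, ?_, hz, ?_⟩
        · simp only [stepA, if_pos hcr, hlast]; split_ifs <;> omega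
        · simp only [stepA, if_pos hcr, hlast]; split_ifs <;> omega
        · simp only [stepA, if_pos hcr, h3, List.length_append, List.length_singleton]
          push_cast; ring
        · simp only [stepA, if_pos hcr]; omega
        · simp only [stepA, if_pos hcr, hlast]; omega
        · have hcnt : List.count 0 (p ++ [z]) = List.count 0 p + if z = 0 then 1 else 0 := by
            by_cases hz0 : z = 0
            · subst hz0; simp
            · simp [List.count_append, hz0]
          simp only [stepA, if_pos hcr, hinner, h6, hcnt]
          push_cast
          split_ifs <;> omega
        · have hflt : (List.filter (fun a => a ≤ 1) (p ++ [z])).length =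
              (List.filter (fun a => a ≤ 1) p).length + if z ≤ 1 then 1 else 0 := by
            by_cases hz1 : z ≤ 1 <;> simp [List.filter_append, hz1]
          simp only [stepA, if_pos hcr, hinner, h7, hflt]
          push_cast
          split_ifs <;> omega
        · intro a ha
          rcases List.mem_append.1 ha with hm | hm
          · exact hbnd a hm
          · have : a = z := by simpa using hm
            omega
      have hres := ih z (p ++ [z]) (n + 1) (stepA role s c) hstep
      have hlist : p ++ z :: (preZeros role t z).2 = (p ++ [z]) ++ (preZeros role t z).2 := by
        simp
      rw [List.foldl_cons, e1a, e1b, hlist, hlen]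
      exact hres
    · by_cases hc0 : c = 0
      · have e1a : (preZeros role (c :: t) z).1 = (preZeros role t (z + 1)).1 := by
          simp only [preZeros, if_neg hcr, if_pos hc0]
        have e1b : (preZeros role (c :: t) z).2 = (preZeros role t (z + 1)).2 := by
          simp only [preZeros, if_neg hcr, if_pos hc0]
        have hstep : StatsInv (z + 1) p (n + 1) (stepA role s c) := by
          refine ⟨?_, ?_, ?_, ?_, ?_, ?_, ?_, by omega, ?_⟩
          all_goals try simp only [stepA, if_neg hcr, if_pos hc0]
          · exact h1
          · omega
          · exact h3
          · omega
          · omega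
          · exact h6
          · exact h7
          · intro a ha; have := hbnd a ha; omega
        have hres := ih (z + 1) p (n + 1) (stepA role s c) hstep
        rw [List.foldl_cons, e1a, e1b, hlen]
        exact hres
      · have e1a : (preZeros role (c :: t) z).1 = (preZeros role t z).1 := by
          simp only [preZeros, if_neg hcr, if_neg hc0]
        have e1b : (preZeros role (c :: t) z).2 = (preZeros role t z).2 := by
          simp only [preZeros, if_neg hcr, if_neg hc0]
        have hstep : StatsInv z p (n + 1) (stepA role s c) := by
          refine ⟨?_, ?_, ?_, ?_, ?_, ?_, ?_, hz, hbnd⟩ <;>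
            simp only [stepA, if_neg hcr, if_neg hc0]
          · exact h1
          · exact h2
          · exact h3
          · omega
          · exact h5
          · exact h6
          · exact h7
        have hres := ih z p (n + 1) (stepA role s c) hstep
        rw [List.foldl_cons, e1a, e1b, hlen]
        exact hres

-- ===== VERDICT (by name: the statement is the Claim_ definition above) =====
theorem count_shape_spec : Claim_equal_count_shape := by
  intro board x y dx dy role size _hDom _hPre
  unfold Spec_count_shape count_shape count_shape_alt
  have hfold : count_shape_loop board x y dx dy role size 5 1 (0, 0, 0, 0, 0, 0, 0) =
      List.foldl (stepA role) (0, 0, 0, 0, 0, 0, 0)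
        (cells_loop board x y dx dy role size 5 1 0) :=
    loop_eq_foldl_cells board x y dx dy role size 5 1 (0, 0, 0, 0, 0, 0, 0)
  have hinv := foldl_stepA_inv role (cells_loop board x y dx dy role size 5 1 0) 0 [] 0
      (0, 0, 0, 0, 0, 0, 0) ⟨rfl, rfl, rfl, rfl, rfl, rfl, rfl, le_refl 0, by simp⟩
  simp only [List.nil_append, zero_add] at hinv
  obtain ⟨h1, h2, h3, h4, h5, h6, h7, hz, hbnd⟩ := hinv
  obtain ⟨hL0, _⟩ := lastD_nonneg_le _ _ hz hbnd
  simp only [hfold, h1, h3, h4, h5, h6, h7]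
  have honee :
      (if (preZeros role (cells_loop board x y dx dy role size 5 1 0) 0).2.getLast?.getD 0 = 0
        then (0 : Int)
        else (((preZeros role (cells_loop board x y dx dy role size 5 1 0) 0).2.filter
            (fun a => a ≤ 1)).length : Int)) =
      (if (preZeros role (cells_loop board x y dx dy role size 5 1 0) 0).2.getLast?.getD 0 > 0
        then (((preZeros role (cells_loop board x y dx dy role size 5 1 0) 0).2.filter
            (fun p => p ≤ 1)).length : Int)
        else 0) := by
    split_ifs <;> omega
  rw [honee]
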